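-- pv_equiv track=rewrite | github.com/jiyer-nmdp/pyglstring | check_glstring.py | checkdups
-- ===== SOURCE A (Python) =====
-- def checkdups(mysetlist):
--     """takes a list of sets, and returns a set of items that are found in
--     more than one set"""
--     alldups = set()
--     for i, myset in enumerate(mysetlist):
--         dups = set()
--         othersets = set().union(*mysetlist[i+1:])
--         dups = myset & othersets
--         alldups.update(dups)
--     return alldups
-- ===== SOURCE B (Python) =====
-- def checkdups(mysetlist):
--     """takes a list of sets, and returns a set of items that are found in
--     more than one set"""
--     alldups = set()
--     seen = set()
--     for myset in reversed(mysetlist):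
--         alldups = (myset & seen) | alldups
--         seen |= myset
--     return alldups
-- ===== Notes on version B (the rewrite author's own statement) =====
-- stated objective: faster
-- what changed: One reverse pass keeps a running union 'seen' of the sets already scanned, so each set's duplicates are just 'myset & seen'; this removes A's per-iteration re-union of the whole remaining tail.
import Mathlib
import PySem

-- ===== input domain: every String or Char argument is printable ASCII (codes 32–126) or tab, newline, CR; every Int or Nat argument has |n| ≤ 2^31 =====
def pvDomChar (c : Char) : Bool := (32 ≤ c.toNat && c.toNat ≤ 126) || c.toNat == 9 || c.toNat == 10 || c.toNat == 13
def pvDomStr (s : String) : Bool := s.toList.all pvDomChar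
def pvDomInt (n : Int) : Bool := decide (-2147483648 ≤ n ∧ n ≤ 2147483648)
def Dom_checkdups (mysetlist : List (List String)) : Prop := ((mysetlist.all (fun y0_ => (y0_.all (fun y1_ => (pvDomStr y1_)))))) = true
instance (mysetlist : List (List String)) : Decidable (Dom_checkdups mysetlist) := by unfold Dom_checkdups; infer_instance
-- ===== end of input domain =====

-- B replaces A's per-iteration union of the whole remaining tail by one reverse pass with a running 'seen' union (objective: faster).
-- Each inner List String stands for one Python set (PySem.Set model: distinct elements in first-insertion order); ports normalise it with Set.ofList.

-- ===== PORT A =====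
-- A's loop: for i, myset in enumerate(mysetlist), the slice mysetlist[i+1:] is exactly the
-- remaining tail of the structural recursion, so the loop is ported with that tail in hand.
def checkdupsGo (alldups : PySem.Set String) : List (List String) → PySem.Set String
  | [] => alldups
  | myset :: rest =>
    -- othersets = set().union(*mysetlist[i+1:])  (union of the tail, in order = ofList of its concatenation)
    let othersets : PySem.Set String := PySem.Set.ofList rest.flatten
    -- dups = myset & othersets
    let dups : PySem.Set String := PySem.Set.inter (PySem.Set.ofList myset) othersets
    -- alldups.update(dups), then the next loop iteration
    checkdupsGo (PySem.Set.update alldups dups) rest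

def checkdups (mysetlist : List (List String)) : List String :=
  checkdupsGo PySem.Set.empty mysetlist

-- ===== PORT B =====
-- for myset in reversed(mysetlist): alldups = (myset & seen) | alldups; seen |= myset
def checkdups_alt (mysetlist : List (List String)) : List String :=
  (mysetlist.reverse.foldl
    (fun (st : PySem.Set String × PySem.Set String) myset =>
      (PySem.Set.union (PySem.Set.inter (PySem.Set.ofList myset) st.2) st.1,
       PySem.Set.update st.2 myset))
    (PySem.Set.empty, PySem.Set.empty)).1

-- ===== PRECONDITION & SPEC =====
def Spec_checkdups (mysetlist : List (List String)) (out : List String) : Prop := out = checkdups_alt mysetlist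
instance (mysetlist : List (List String)) (out : List String) : Decidable (Spec_checkdups mysetlist out) := by unfold Spec_checkdups; infer_instance

-- ===== CLAIM (what is proved, stated in full; the proofs are below) =====
def Claim_equal_checkdups : Prop := ∀ (mysetlist : List (List String)), Dom_checkdups mysetlist → Spec_checkdups mysetlist (checkdups mysetlist)

-- ===== LEMMAS AND PROOFS =====

-- the common value: per-set duplicate pieces, concatenated front-to-back and deduplicated
def dupsOf : List (List String) → PySem.Set String
  | [] => PySem.Set.empty
  | s :: rest =>
    PySem.Set.union (PySem.Set.inter (PySem.Set.ofList s) (PySem.Set.ofList rest.flatten)) (dupsOf rest)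

theorem dupsOf_nodup (l : List (List String)) : (dupsOf l).Nodup := by
  induction l with
  | nil => simp [dupsOf]
  | cons s rest ih =>
    exact PySem.Set.nodup_union _ _ (PySem.Set.nodup_inter _ _ (PySem.Set.nodup_ofList s))

theorem inter_congr (s t t' : List String) (h : ∀ x, x ∈ t ↔ x ∈ t') :
    PySem.Set.inter s t = PySem.Set.inter s t' := by
  apply List.filter_congr
  intro x _
  rw [Bool.eq_iff_iff, PySem.Set.contains_iff, PySem.Set.contains_iff]
  exact h x

theorem update_update (a b c : List String) (hb : b.Nodup) :
    PySem.Set.update (PySem.Set.update a b) c = PySem.Set.update a (PySem.Set.union b c) := by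
  have h1 : PySem.Set.update (PySem.Set.update a b) c = PySem.Set.update a (b ++ c) := by
    simp [PySem.Set.update, List.foldl_append]
  rw [h1, PySem.Set.update_eq_append_filter, PySem.Set.update_eq_append_filter,
    PySem.Set.ofList_append, PySem.Set.ofList_eq_self_of_nodup _ hb,
    show PySem.Set.union b c = PySem.Set.update b c from rfl,
    PySem.Set.ofList_eq_self_of_nodup _ (PySem.Set.nodup_update b c hb)]

theorem checkdupsGo_eq (l : List (List String)) (acc : PySem.Set String) :
    checkdupsGo acc l = PySem.Set.update acc (dupsOf l) := by
  induction l generalizing acc with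
  | nil => simp [checkdupsGo, dupsOf, PySem.Set.update_nil]
  | cons s rest ih =>
    simp only [checkdupsGo, dupsOf]
    rw [ih, update_update _ _ _ (PySem.Set.nodup_inter _ _ (PySem.Set.nodup_ofList s))]

def bGo : List (List String) → PySem.Set String × PySem.Set String
  | [] => (PySem.Set.empty, PySem.Set.empty)
  | s :: rest =>
    (PySem.Set.union (PySem.Set.inter (PySem.Set.ofList s) (bGo rest).2) (bGo rest).1,
     PySem.Set.update (bGo rest).2 s)

theorem checkdups_alt_eq_bGo (l : List (List String)) : checkdups_alt l = (bGo l).1 := by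
  unfold checkdups_alt
  rw [List.foldl_reverse]
  congr 1
  induction l with
  | nil => rfl
  | cons s rest ih => simp only [List.foldr, bGo, ih]

theorem mem_bGo_seen (l : List (List String)) (x : String) : x ∈ (bGo l).2 ↔ x ∈ l.flatten := by
  induction l with
  | nil => simp [bGo, PySem.Set.empty]
  | cons s rest ih =>
    simp [bGo, PySem.Set.mem_update, ih, List.mem_flatten]
    exact or_comm

theorem bGo_fst_eq_dupsOf (l : List (List String)) : (bGo l).1 = dupsOf l := by
  induction l with
  | nil => rfl
  | cons s rest ih =>
    simp only [bGo, dupsOf, ih]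
    rw [inter_congr (PySem.Set.ofList s) ((bGo rest).2) (PySem.Set.ofList rest.flatten)
      (fun x => by simp [mem_bGo_seen, PySem.Set.mem_ofList])]

-- ===== VERDICT (by name: the statement is the Claim_ definition above) =====
theorem checkdups_spec : Claim_equal_checkdups := by
  intro l _
  unfold Spec_checkdups checkdups
  rw [checkdupsGo_eq, checkdups_alt_eq_bGo, bGo_fst_eq_dupsOf,
    show (PySem.Set.empty : PySem.Set String) = [] from rfl, PySem.Set.update_nil_left,
    PySem.Set.ofList_eq_self_of_nodup _ (dupsOf_nodup l)]
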